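-- pv_equiv track=rewrite | github.com/vertica/VerticaPy | verticapy/ml_pipeline/_helper.py | to_sql
-- ===== SOURCE A (Python) =====
-- def to_sql(sql):
--     even = True
--     string = ""
--     for c in sql:
--         if even and c == "'":
--             string += "' || QUOTE_LITERAL('"
--             even = False
--         elif not even and c == "'":
--             string += "') || '"
--             even = True
--         else:
--             string += c
--     string = string[:-1] + "';"
--     return string
-- ===== SOURCE B (Python) =====
-- def to_sql(sql):
--     parts = sql.split("'")
--     pieces = [parts[0]]
--     open_quote = True
--     for part in parts[1:]:
--         pieces.append("' || QUOTE_LITERAL('" if open_quote else "') || '")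
--         pieces.append(part)
--         open_quote = not open_quote
--     result = "".join(pieces)
--     return result[:-1] + "';"
-- ===== Notes on version B (the rewrite author's own statement) =====
-- stated objective: simpler
-- what changed: Replaces A's character-by-character boolean state machine (building the output one char at a time) with str.split on the quote character plus a join of the parts with alternating QUOTE_LITERAL open/close tokens, keeping the same unconditional drop-last-char-then-append-quote-semicolon tail; split/join run in C, avoiding A's per-character string concatenation.
import Mathlib
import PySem

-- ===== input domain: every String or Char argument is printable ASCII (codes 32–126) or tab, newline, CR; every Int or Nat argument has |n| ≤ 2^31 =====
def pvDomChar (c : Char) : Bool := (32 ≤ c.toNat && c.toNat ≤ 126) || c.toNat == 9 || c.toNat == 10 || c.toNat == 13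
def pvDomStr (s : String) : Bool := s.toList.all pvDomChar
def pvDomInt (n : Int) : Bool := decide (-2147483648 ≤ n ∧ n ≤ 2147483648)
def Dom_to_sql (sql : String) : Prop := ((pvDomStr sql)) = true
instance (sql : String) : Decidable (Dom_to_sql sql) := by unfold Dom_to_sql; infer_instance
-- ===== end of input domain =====

-- B replaces A's character-by-character state machine with split-on-quote + joining
-- alternating QUOTE_LITERAL tokens between the parts (objective: simpler decomposition).

-- ===== PORT A =====
def tokA : List Char := "' || QUOTE_LITERAL('".toList
def tokB : List Char := "') || '".toList

def to_sql (sql : String) : String :=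
  -- even=True; string=""; for c in sql: … ; string = string[:-1] + "';"
  let r := sql.toList.foldl
    (fun (st : Bool × List Char) c =>
      if st.1 = true ∧ c = '\'' then (false, st.2 ++ tokA)
      else if st.1 = false ∧ c = '\'' then (true, st.2 ++ tokB)
      else (st.1, st.2 ++ [c]))
    (true, ([] : List Char))
  String.ofList (PySem.List.slice r.2 none (some (-1)) ++ "';".toList)

-- ===== PORT B =====
def to_sql_alt (sql : String) : String :=
  -- parts = sql.split("'"); pieces = [parts[0]]; alternate tokens; "".join; [:-1] + "';"
  let parts := sql.toList.splitOn '\''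
  let st := (parts.drop 1).foldl
    (fun (st : Bool × List (List Char)) part =>
      (!st.1, st.2 ++ [if st.1 then tokA else tokB, part]))
    (true, [parts.headD []])
  let res := PySem.Chars.join [] st.2
  String.ofList (PySem.List.slice res none (some (-1)) ++ "';".toList)

-- ===== PRECONDITION & SPEC =====
def Spec_to_sql (sql : String) (out : String) : Prop := out = to_sql_alt sql
instance (sql : String) (out : String) : Decidable (Spec_to_sql sql out) := by unfold Spec_to_sql; infer_instance

-- ===== CLAIM (what is proved, stated in full; the proofs are below) =====
def Claim_equal_to_sql : Prop := ∀ (sql : String), Dom_to_sql sql → Spec_to_sql sql (to_sql sql)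

-- ===== LEMMAS AND PROOFS =====

-- the character stream A emits, as a structural recursion (proof device)
def pvBody (e : Bool) : List Char → List Char
  | [] => []
  | c :: cs => if c = '\'' then (if e then tokA else tokB) ++ pvBody (!e) cs
               else c :: pvBody e cs

-- the piece list B builds after parts[0], and its flattening
def pvPieces (e : Bool) : List (List Char) → List (List Char)
  | [] => []
  | p :: ps => (if e then tokA else tokB) :: p :: pvPieces (!e) ps

def pvIlv (e : Bool) : List (List Char) → List Char
  | [] => []
  | p :: ps => (if e then tokA else tokB) ++ p ++ pvIlv (!e) ps

theorem pv_foldA (cs : List Char) (e : Bool) (acc : List Char) :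
    (cs.foldl
      (fun (st : Bool × List Char) c =>
        if st.1 = true ∧ c = '\'' then (false, st.2 ++ tokA)
        else if st.1 = false ∧ c = '\'' then (true, st.2 ++ tokB)
        else (st.1, st.2 ++ [c])) (e, acc)).2 = acc ++ pvBody e cs := by
  induction cs generalizing e acc with
  | nil => simp [pvBody]
  | cons c cs ih =>
    by_cases hc : c = '\''
    · cases e <;> simp [hc, pvBody, ih, List.append_assoc]
    · cases e <;> simp [hc, pvBody, ih, List.append_assoc]

theorem pv_splitOnP_ne_nil (cs : List Char) : cs.splitOnP (· == '\'') ≠ [] := by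
  induction cs with
  | nil => simp [List.splitOnP_nil]
  | cons c cs ih =>
    rw [List.splitOnP_cons]
    split_ifs
    · simp
    · cases h : cs.splitOnP (· == '\'') with
      | nil => exact absurd h ih
      | cons p ps => simp

theorem pv_body_split (cs : List Char) (e : Bool) :
    pvBody e cs = (cs.splitOnP (· == '\'')).headD [] ++ pvIlv e (cs.splitOnP (· == '\'')).tail := by
  induction cs generalizing e with
  | nil => simp [List.splitOnP_nil, pvBody, pvIlv]
  | cons c cs ih =>
    rw [List.splitOnP_cons]
    by_cases hc : c = '\''
    · obtain ⟨p, ps, hps⟩ : ∃ p ps, cs.splitOnP (· == '\'') = p :: ps := by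
        cases h : cs.splitOnP (· == '\'') with
        | nil => exact absurd h (pv_splitOnP_ne_nil cs)
        | cons p ps => exact ⟨p, ps, rfl⟩
      have := ih (!e)
      rw [hps] at this
      rw [hps]
      simp [hc, pvBody, pvIlv, this, List.append_assoc]
    · obtain ⟨p, ps, hps⟩ : ∃ p ps, cs.splitOnP (· == '\'') = p :: ps := by
        cases h : cs.splitOnP (· == '\'') with
        | nil => exact absurd h (pv_splitOnP_ne_nil cs)
        | cons p ps => exact ⟨p, ps, rfl⟩
      have := ih e
      rw [hps] at this
      simp [hc, pvBody, hps, this]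

theorem pv_foldB (ps : List (List Char)) (e : Bool) (acc : List (List Char)) :
    (ps.foldl
      (fun (st : Bool × List (List Char)) part =>
        (!st.1, st.2 ++ [if st.1 then tokA else tokB, part])) (e, acc)).2
      = acc ++ pvPieces e ps := by
  induction ps generalizing e acc with
  | nil => simp [pvPieces]
  | cons p ps ih =>
    cases e <;> simp [pvPieces, ih, List.append_assoc]

theorem pv_join_nil_flatten (l : List (List Char)) :
    PySem.Chars.join [] l = l.flatten := by
  induction l with
  | nil => simp [PySem.Chars.join_nil]
  | cons p ps ih =>
    cases ps with
    | nil => simp [PySem.Chars.join_singleton]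
    | cons q qs => rw [PySem.Chars.join_cons_cons]; simp [ih]

theorem pv_flatten_pieces (ps : List (List Char)) (e : Bool) :
    (pvPieces e ps).flatten = pvIlv e ps := by
  induction ps generalizing e with
  | nil => rfl
  | cons p t ih => simp [pvPieces, pvIlv, ih, List.append_assoc]

-- ===== VERDICT (by name: the statement is the Claim_ definition above) =====
theorem to_sql_spec : Claim_equal_to_sql := by
  intro sql _
  show to_sql sql = to_sql_alt sql
  unfold to_sql to_sql_alt
  obtain ⟨p, ps, hps⟩ : ∃ p ps, sql.toList.splitOnP (· == '\'') = p :: ps := by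
    cases h : sql.toList.splitOnP (· == '\'') with
    | nil => exact absurd h (pv_splitOnP_ne_nil sql.toList)
    | cons p ps => exact ⟨p, ps, rfl⟩
  have hsplit : sql.toList.splitOn '\'' = p :: ps := by
    simpa [List.splitOn] using hps
  have hA := pv_foldA sql.toList true []
  have hB := pv_foldB ps true [p]
  have hbody := pv_body_split sql.toList true
  rw [hps] at hbody
  simp only [hsplit, List.drop_one, List.tail_cons, List.headD_cons, hA, hB,
    pv_join_nil_flatten, List.flatten_append, pv_flatten_pieces, List.nil_append,
    List.flatten_cons, List.flatten_nil, List.append_nil]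
  rw [hbody]; simp
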